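-- pv_equiv track=rewrite | github.com/raxxex/arbtronx-live-trading | src/risk/advanced_risk_manager.py | _are_correlated_assets
-- ===== SOURCE A (Python) =====
-- def _are_correlated_assets(asset1: str, asset2: str) -> bool:
--     """Check if two assets are correlated"""
--     # Define correlation groups
--     major_crypto = {'BTC', 'ETH'}
--     defi_tokens = {'SNX', 'UNI', 'AAVE', 'COMP'}
--     layer1_tokens = {'SOL', 'ADA', 'DOT', 'AVAX'}
--
--     # Check if both assets are in the same group
--     for group in [major_crypto, defi_tokens, layer1_tokens]:
--         if asset1 in group and asset2 in group:
--             return True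
--
--     return False
-- ===== SOURCE B (Python) =====
-- _GROUP_OF = {
--     'BTC': 'major', 'ETH': 'major',
--     'SNX': 'defi', 'UNI': 'defi', 'AAVE': 'defi', 'COMP': 'defi',
--     'SOL': 'layer1', 'ADA': 'layer1', 'DOT': 'layer1', 'AVAX': 'layer1',
-- }
--
-- def _are_correlated_assets(asset1: str, asset2: str) -> bool:
--     """Check if two assets are correlated"""
--     g1 = _GROUP_OF.get(asset1)
--     return g1 is not None and g1 == _GROUP_OF.get(asset2)
-- ===== Notes on version B (the rewrite author's own statement) =====
-- stated objective: idiomatic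
-- what changed: Replaces the loop over three membership sets with a single flat asset-to-group-label dict built once; the function becomes two lookups and a label comparison.
import Mathlib
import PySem

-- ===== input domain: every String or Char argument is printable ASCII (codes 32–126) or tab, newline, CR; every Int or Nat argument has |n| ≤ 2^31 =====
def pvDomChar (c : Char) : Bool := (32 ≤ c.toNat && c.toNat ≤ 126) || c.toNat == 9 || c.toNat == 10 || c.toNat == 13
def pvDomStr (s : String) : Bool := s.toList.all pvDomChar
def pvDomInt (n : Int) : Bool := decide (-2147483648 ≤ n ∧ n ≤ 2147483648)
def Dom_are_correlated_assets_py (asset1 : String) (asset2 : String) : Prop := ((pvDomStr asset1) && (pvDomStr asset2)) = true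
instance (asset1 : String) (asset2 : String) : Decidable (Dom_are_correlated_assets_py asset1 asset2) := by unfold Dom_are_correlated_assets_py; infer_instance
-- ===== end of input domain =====

-- B replaces A's loop over three correlation sets with one flat symbol→group-label dict and two lookups (idiomatic; same cost).

-- ===== PORT A =====
-- helper: the "for group in [...]" loop with early return, as structural recursion
def pvLoopA (asset1 asset2 : String) : List (PySem.Set String) → Bool
  | [] => false
  | g :: gs =>
      if PySem.Set.contains g asset1 && PySem.Set.contains g asset2 then true
      else pvLoopA asset1 asset2 gs

def are_correlated_assets_py (asset1 : String) (asset2 : String) : Bool :=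
  let major_crypto : PySem.Set String := PySem.Set.ofList ["BTC", "ETH"]
  let defi_tokens : PySem.Set String := PySem.Set.ofList ["SNX", "UNI", "AAVE", "COMP"]
  let layer1_tokens : PySem.Set String := PySem.Set.ofList ["SOL", "ADA", "DOT", "AVAX"]
  pvLoopA asset1 asset2 [major_crypto, defi_tokens, layer1_tokens]

def pvGroupOf : PySem.Dict String String :=
  PySem.Dict.ofList [("BTC", "major"), ("ETH", "major"),
    ("SNX", "defi"), ("UNI", "defi"), ("AAVE", "defi"), ("COMP", "defi"),
    ("SOL", "layer1"), ("ADA", "layer1"), ("DOT", "layer1"), ("AVAX", "layer1")]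

def are_correlated_assets_py_alt (asset1 : String) (asset2 : String) : Bool :=
  match PySem.Dict.get? pvGroupOf asset1 with
  | none => false
  | some g1 => PySem.Dict.get? pvGroupOf asset2 == some g1

-- ===== PRECONDITION & SPEC =====
def Spec_are_correlated_assets_py (asset1 : String) (asset2 : String) (out : Bool) : Prop := out = are_correlated_assets_py_alt asset1 asset2
instance (asset1 : String) (asset2 : String) (out : Bool) : Decidable (Spec_are_correlated_assets_py asset1 asset2 out) := by unfold Spec_are_correlated_assets_py; infer_instance

-- ===== CLAIM (what is proved, stated in full; the proofs are below) =====
def Claim_equal_are_correlated_assets_py : Prop := ∀ (asset1 : String) (asset2 : String), Dom_are_correlated_assets_py asset1 asset2 → Spec_are_correlated_assets_py asset1 asset2 (are_correlated_assets_py asset1 asset2)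

-- ===== LEMMAS AND PROOFS =====
lemma pv_str_cases (a : String) :
    a = "BTC" ∨ a = "ETH" ∨ a = "SNX" ∨ a = "UNI" ∨ a = "AAVE" ∨ a = "COMP" ∨
    a = "SOL" ∨ a = "ADA" ∨ a = "DOT" ∨ a = "AVAX" ∨
    (a ≠ "BTC" ∧ "BTC" ≠ a ∧
     a ≠ "ETH" ∧ "ETH" ≠ a ∧
     a ≠ "SNX" ∧ "SNX" ≠ a ∧
     a ≠ "UNI" ∧ "UNI" ≠ a ∧
     a ≠ "AAVE" ∧ "AAVE" ≠ a ∧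
     a ≠ "COMP" ∧ "COMP" ≠ a ∧
     a ≠ "SOL" ∧ "SOL" ≠ a ∧
     a ≠ "ADA" ∧ "ADA" ≠ a ∧
     a ≠ "DOT" ∧ "DOT" ≠ a ∧
     a ≠ "AVAX" ∧ "AVAX" ≠ a) := by
  tauto

lemma pv_sets :
    PySem.Set.ofList ["BTC", "ETH"] = ["BTC", "ETH"] ∧
    PySem.Set.ofList ["SNX", "UNI", "AAVE", "COMP"] = ["SNX", "UNI", "AAVE", "COMP"] ∧
    PySem.Set.ofList ["SOL", "ADA", "DOT", "AVAX"] = ["SOL", "ADA", "DOT", "AVAX"] := by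
  decide


set_option maxHeartbeats 4000000 in
lemma pv_dict : pvGroupOf = PySem.Dict.mk [("BTC", "major"), ("ETH", "major"),
    ("SNX", "defi"), ("UNI", "defi"), ("AAVE", "defi"), ("COMP", "defi"),
    ("SOL", "layer1"), ("ADA", "layer1"), ("DOT", "layer1"), ("AVAX", "layer1")] := by
  rfl

lemma pv_A_eval (a1 a2 : String) : are_correlated_assets_py a1 a2 =
    (((a1 == "BTC" || a1 == "ETH") && (a2 == "BTC" || a2 == "ETH")) ||
     ((a1 == "SNX" || a1 == "UNI" || a1 == "AAVE" || a1 == "COMP") &&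
      (a2 == "SNX" || a2 == "UNI" || a2 == "AAVE" || a2 == "COMP")) ||
     ((a1 == "SOL" || a1 == "ADA" || a1 == "DOT" || a1 == "AVAX") &&
      (a2 == "SOL" || a2 == "ADA" || a2 == "DOT" || a2 == "AVAX"))) := by
  simp only [are_correlated_assets_py, pv_sets.1, pv_sets.2.1, pv_sets.2.2, pvLoopA,
    PySem.Set.contains, List.contains_cons, List.contains_nil, Bool.or_false,
    Bool.if_true_left, Bool.or_assoc, Bool.decide_eq_true]

lemma pv_B_get (a : String) : PySem.Dict.get? pvGroupOf a =
    (if "BTC" == a then some "major" else if "ETH" == a then some "major" else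
     if "SNX" == a then some "defi" else if "UNI" == a then some "defi" else
     if "AAVE" == a then some "defi" else if "COMP" == a then some "defi" else
     if "SOL" == a then some "layer1" else if "ADA" == a then some "layer1" else
     if "DOT" == a then some "layer1" else if "AVAX" == a then some "layer1" else none) := by
  simp only [pv_dict, PySem.Dict.get?_mk_cons]
  rfl

-- ===== VERDICT (by name: the statement is the Claim_ definition above) =====
set_option maxHeartbeats 2000000 in
theorem are_correlated_assets_py_spec : Claim_equal_are_correlated_assets_py := by
  intro a1 a2 _
  unfold Spec_are_correlated_assets_py
  rw [pv_A_eval]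
  rcases pv_str_cases a1 with h|h|h|h|h|h|h|h|h|h|⟨h1,h2,h3,h4,h5,h6,h7,h8,h9,h10,h11,h12,h13,h14,h15,h16,h17,h18,h19,h20⟩ <;>
    rcases pv_str_cases a2 with g|g|g|g|g|g|g|g|g|g|⟨g1,g2,g3,g4,g5,g6,g7,g8,g9,g10,g11,g12,g13,g14,g15,g16,g17,g18,g19,g20⟩ <;>
    subst_vars <;>
    simp only [are_correlated_assets_py_alt, pv_B_get] <;>
    simp_all
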